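-- pv_equiv track=rewrite | github.com/ob1-dev/aoc2025 | day2/part_2.py | has_repeating_pattern
-- ===== SOURCE A (Python) =====
-- def has_repeating_pattern(value):
--     number_string = str(value)
--     number_length = len(number_string)
--
--     # Only check divisors of the string length
--     for pattern_length in range(1, number_length):
--         if number_length % pattern_length != 0:
--             continue
--
--         # Check if the pattern repeats
--         pattern = number_string[:pattern_length]
--         if pattern * (number_length // pattern_length) == number_string:
--             return True
--
--     return False
-- ===== SOURCE B (Python) =====
-- def has_repeating_pattern(value):
--     s = str(value)
--     return s in (s + s)[1:-1]
-- ===== Notes on version B (the rewrite author's own statement) =====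
-- stated objective: idiomatic
-- what changed: Replaces A's divisor-enumeration loop (try every pattern length that divides len(s) and compare the repeated prefix) with the standard one-liner `s in (s+s)[1:-1]`: a single substring search that is True exactly when the digit-string has a proper period.
import Mathlib
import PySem

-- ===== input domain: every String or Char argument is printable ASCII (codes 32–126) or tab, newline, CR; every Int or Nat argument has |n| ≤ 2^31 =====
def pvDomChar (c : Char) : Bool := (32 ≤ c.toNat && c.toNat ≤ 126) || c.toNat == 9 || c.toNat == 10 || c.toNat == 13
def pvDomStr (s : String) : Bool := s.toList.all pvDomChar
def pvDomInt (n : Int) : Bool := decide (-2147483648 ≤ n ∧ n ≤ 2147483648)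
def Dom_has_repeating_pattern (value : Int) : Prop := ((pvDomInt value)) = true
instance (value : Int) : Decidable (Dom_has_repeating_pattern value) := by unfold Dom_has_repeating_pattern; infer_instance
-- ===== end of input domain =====

-- B replaces A's divisor-enumeration-and-compare loop with the idiomatic one-line
-- periodicity test `s in (s+s)[1:-1]` (same result, a genuinely different algorithm).


-- ===== PORT A =====
-- Python string repetition `pattern * k` ported by hand (exact: k copies for k ≥ 0, [] for k < 0).
def pvStrMul (p : List Char) (k : Int) : List Char := (List.replicate k.toNat p).flatten

-- the `for pattern_length in range(1, number_length)` loop with `continue` / early `return True`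
def pvLoopA (cs : List Char) (n : Int) : List Int → Bool
  | [] => false
  | d :: ds =>
    if PySem.Int.mod n d ≠ 0 then pvLoopA cs n ds
    else if pvStrMul (PySem.List.slice cs none (some d)) (PySem.Int.floordiv n d) = cs then true
    else pvLoopA cs n ds

def has_repeating_pattern (value : Int) : Bool :=
  let number_string := PySem.Int.toChars value
  let number_length : Int := number_string.length
  pvLoopA number_string number_length (PySem.List.pyRange 1 number_length)

-- ===== PORT B =====
def has_repeating_pattern_alt (value : Int) : Bool :=
  let s := PySem.Int.toChars value
  PySem.Chars.isIn s (PySem.List.slice (s ++ s) (some 1) (some (-1)))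

-- ===== PRECONDITION & SPEC =====
def Spec_has_repeating_pattern (value : Int) (out : Bool) : Prop := out = has_repeating_pattern_alt value
instance (value : Int) (out : Bool) : Decidable (Spec_has_repeating_pattern value out) := by unfold Spec_has_repeating_pattern; infer_instance

-- ===== CLAIM (what is proved, stated in full; the proofs are below) =====
def Claim_equal_has_repeating_pattern : Prop := ∀ (value : Int), Dom_has_repeating_pattern value → Spec_has_repeating_pattern value (has_repeating_pattern value)

-- ===== LEMMAS AND PROOFS =====

-- str(value) is never the empty string
theorem pv_toDigitsCore_len (b : Nat) : ∀ (fuel n : Nat) (ds : List Char),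
    ds.length ≤ (Nat.toDigitsCore b fuel n ds).length := by
  intro fuel
  induction fuel with
  | zero => intro n ds; simp [Nat.toDigitsCore]
  | succ f ih =>
    intro n ds
    simp only [Nat.toDigitsCore]
    split
    · simp
    · exact le_trans (by simp) (ih _ _)

theorem pv_toChars_ne_nil (v : Int) : PySem.Int.toChars v ≠ [] := by
  unfold PySem.Int.toChars
  split
  · simp
  · intro h
    have h1 : 1 ≤ (Nat.toDigits 10 v.toNat).length := by
      unfold Nat.toDigits
      -- toDigits b n = toDigitsCore b (n+1) n []; one step always conses a digit
      simp only [Nat.toDigitsCore]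
      split
      · simp
      · exact le_trans (by simp) (pv_toDigitsCore_len 10 _ _ _)
    rw [h] at h1; simp at h1

-- loop characterization
theorem pv_loopA_iff (cs : List Char) (n : Int) (ds : List Int) :
    pvLoopA cs n ds = true ↔
      ∃ d ∈ ds, PySem.Int.mod n d = 0 ∧
        pvStrMul (PySem.List.slice cs none (some d)) (PySem.Int.floordiv n d) = cs := by
  induction ds with
  | nil => simp [pvLoopA]
  | cons d ds ih =>
    simp only [pvLoopA]
    by_cases h : PySem.Int.mod n d = 0
    · rw [if_neg (by simp [h])]
      by_cases hp : pvStrMul (PySem.List.slice cs none (some d)) (PySem.Int.floordiv n d) = cs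
      · simp [hp, h]
      · simp [hp, ih, h]
    · simp only [if_pos h, ih]
      constructor
      · rintro ⟨e, he, h1, h2⟩; exact ⟨e, List.mem_cons_of_mem _ he, h1, h2⟩
      · rintro ⟨e, he, h1, h2⟩
        rcases List.mem_cons.mp he with rfl | he'
        · exact absurd h1 h
        · exact ⟨e, he', h1, h2⟩

-- A in terms of natural-number divisors
theorem pv_A_iff (v : Int) :
    has_repeating_pattern v = true ↔
      ∃ d : Nat, 1 ≤ d ∧ d < (PySem.Int.toChars v).length ∧ d ∣ (PySem.Int.toChars v).length ∧
        (List.replicate ((PySem.Int.toChars v).length / d) ((PySem.Int.toChars v).take d)).flatten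
          = PySem.Int.toChars v := by
  simp only [has_repeating_pattern]
  rw [pv_loopA_iff]
  constructor
  · rintro ⟨d, hmem, hmod, heq⟩
    obtain ⟨hd1, hd2⟩ := PySem.List.mem_pyRange_one.mp hmem
    lift d to ℕ using (by omega) with d'
    refine ⟨d', by exact_mod_cast hd1, by exact_mod_cast hd2, ?_, ?_⟩
    · exact_mod_cast (PySem.Int.mod_eq_zero_iff_dvd _ _).mp hmod
    · rw [PySem.List.slice_to _ (by positivity), PySem.Int.floordiv_natCast] at heq
      simpa [pvStrMul] using heq
  · rintro ⟨d', hd1, hd2, hdvd, heq⟩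
    refine ⟨(d' : Int),
      PySem.List.mem_pyRange_one.mpr ⟨by exact_mod_cast hd1, by exact_mod_cast hd2⟩, ?_, ?_⟩
    · exact (PySem.Int.mod_eq_zero_iff_dvd _ _).mpr (by exact_mod_cast hdvd)
    · rw [PySem.List.slice_to _ (by positivity), PySem.Int.floordiv_natCast]
      simpa [pvStrMul] using heq

-- ((s++s).drop k).take n = s.rotate k  for k ≤ n = s.length
theorem pv_double_rotate {α : Type} (s : List α) (k : Nat) (hk : k ≤ s.length) :
    ((s ++ s).drop k).take s.length = s.rotate k := by
  rw [List.rotate_eq_drop_append_take hk, List.drop_append_of_le_length hk, List.take_append]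
  have h1 : (s.drop k).take s.length = s.drop k := List.take_of_length_le (by simp)
  have h2 : s.length - (s.drop k).length = k := by simp; omega
  rw [h1, h2]

-- B in terms of rotations
theorem pv_B_iff (v : Int) :
    has_repeating_pattern_alt v = true ↔
      ∃ k : Nat, 1 ≤ k ∧ k < (PySem.Int.toChars v).length ∧
        (PySem.Int.toChars v).rotate k = PySem.Int.toChars v := by
  simp only [has_repeating_pattern_alt]
  set s := PySem.Int.toChars v with hsdef
  have hn0 : 0 < s.length := List.length_pos_iff.mpr (pv_toChars_ne_nil v)
  have hmid : PySem.List.slice (s ++ s) (some 1) (some (-1))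
      = ((s ++ s).drop 1).take (s.length + s.length - 2) := by
    simp only [PySem.List.slice, PySem.List.clampIdx, List.length_append]
    norm_num
    rw [if_neg (by omega)]
    congr 1
    · omega
    · rw [min_eq_left (by omega : 1 ≤ s.length + s.length)]
      exact List.drop_one
  rw [hmid, ← PySem.Chars.exists_prefix_drop_iff_isIn]
  constructor
  · rintro ⟨j, hpre⟩
    have hlen := hpre.length_le
    rw [List.length_drop, List.length_take] at hlen
    have hj : j + 2 ≤ s.length := by
      rw [List.length_drop, List.length_append] at hlen; omega
    rw [List.drop_take, List.drop_drop] at hpre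
    have h2 : s <+: (s ++ s).drop (1 + j) := hpre.trans (List.take_prefix _ _)
    have h3 := (List.prefix_iff_eq_take.mp h2).symm
    rw [pv_double_rotate s (1 + j) (by omega)] at h3
    exact ⟨1 + j, by omega, by omega, h3⟩
  · rintro ⟨k, hk1, hk2, hrot⟩
    refine ⟨k - 1, ?_⟩
    rw [List.drop_take, List.drop_drop]
    have hk' : 1 + (k - 1) = k := by omega
    rw [hk', List.prefix_iff_eq_take, List.take_take]
    have hmin : min s.length (s.length + s.length - 2 - (k - 1)) = s.length := by omega
    rw [hmin, pv_double_rotate s k (by omega), hrot]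

-- a string that is m full copies of its length-d prefix is fixed by rotate d
theorem pv_rep_rotate {α : Type} (p : List α) (m : Nat) (hm : 1 ≤ m) :
    ((List.replicate m p).flatten).rotate p.length = (List.replicate m p).flatten := by
  obtain ⟨m', rfl⟩ : ∃ m', m = m' + 1 := ⟨m - 1, by omega⟩
  have h1 : (List.replicate (m' + 1) p).flatten = p ++ (List.replicate m' p).flatten := by
    simp [List.replicate_succ]
  have h2 : (List.replicate (m' + 1) p).flatten = (List.replicate m' p).flatten ++ p := by
    rw [List.replicate_succ']; simp
  rw [h1, List.rotate_eq_drop_append_take (by simp), List.drop_append_of_le_length le_rfl,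
      List.take_append_of_le_length le_rfl]
  simp [← h2, h1]

-- rotate-fixed with a divisor period d means the string is copies of its d-prefix
theorem pv_rotate_rep {α : Type} (d : Nat) (_hd : 0 < d) :
    ∀ (m : Nat) (s : List α), s.length = m * d → s.rotate d = s →
      s = (List.replicate m (s.take d)).flatten := by
  intro m
  induction m with
  | zero => intro s hlen _; simp at hlen ⊢; exact hlen
  | succ m ih =>
    intro s hlen hrot
    have hdn : d ≤ s.length := by
      rw [hlen]; exact Nat.le_mul_of_pos_left d (by omega)
    by_cases hm : m = 0
    · subst hm
      have hr : s.drop d = [] := List.eq_nil_of_length_eq_zero (by simp; omega)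
      conv_lhs => rw [← List.take_append_drop d s, hr]
      simp
    · have hlen' : s.length = m * d + d := by rw [hlen, Nat.succ_mul]
      have hmd : d ≤ m * d := Nat.le_mul_of_pos_left d (by omega)
      have hdr : d ≤ (s.drop d).length := by simp; omega
      have hrot' : s.drop d ++ s.take d = s := by
        rw [← List.rotate_eq_drop_append_take hdn, hrot]
      have hrtake : (s.drop d).take d = s.take d := by
        conv_rhs => rw [← hrot']
        rw [List.take_append_of_le_length hdr]
      have hrdrop : s.drop d = (s.drop d).drop d ++ s.take d := by
        conv_lhs => rw [← hrot']
        rw [List.drop_append_of_le_length hdr]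
      have hrrot : (s.drop d).rotate d = s.drop d := by
        rw [List.rotate_eq_drop_append_take hdr, hrtake, ← hrdrop]
      have hrlen : (s.drop d).length = m * d := by simp; omega
      have := ih (s.drop d) hrlen hrrot
      rw [hrtake] at this
      conv_lhs => rw [← List.take_append_drop d s, this]
      simp [List.replicate_succ]

-- rotate-fixed is closed under repeated rotation
theorem pv_rotate_pow {α : Type} (s : List α) (k : Nat) (h : s.rotate k = s) :
    ∀ a : Nat, s.rotate (a * k) = s := by
  intro a
  induction a with
  | zero => simp
  | succ a ih => rw [Nat.succ_mul, ← List.rotate_rotate, ih, h]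

-- from one nontrivial fixed rotation get a fixed rotation by gcd(n, k)
theorem pv_rotate_gcd {α : Type} (s : List α) (k : Nat) (hk1 : 1 ≤ k)
    (hk2 : k < s.length) (h : s.rotate k = s) :
    s.rotate (Nat.gcd s.length k) = s := by
  have hn0 : (0:Int) < (s.length : Int) := by exact_mod_cast (show 0 < s.length by omega)
  have hg_lt : Nat.gcd s.length k < s.length :=
    lt_of_le_of_lt (Nat.gcd_le_right s.length hk1) hk2
  set b : Int := Nat.gcdB s.length k with hb
  have hc0 : 0 ≤ b % (s.length : Int) := Int.emod_nonneg _ (by omega)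
  set a' : Nat := (b % (s.length : Int)).toNat with ha'
  have hca : ((a' : Int)) = b % (s.length : Int) := Int.toNat_of_nonneg hc0
  have key : ((a' * k : Nat) : Int) % (s.length : Int)
      = ((Nat.gcd s.length k : Nat) : Int) % (s.length : Int) := by
    push_cast
    rw [hca]
    have l1 : ((b % (s.length:Int)) * k) % (s.length:Int) = (b * k) % (s.length:Int) := by
      conv_rhs => rw [Int.mul_emod]
      conv_lhs => rw [Int.mul_emod]
      rw [Int.emod_emod_of_dvd _ dvd_rfl]
    have l2 : ((Nat.gcd s.length k : Int)) % (s.length:Int) = (b * k) % (s.length:Int) := by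
      rw [Nat.gcd_eq_gcd_ab s.length k]
      rw [add_comm, mul_comm (k:Int) b]
      exact Int.add_mul_emod_self_left _ _ _
    rw [l1, l2]
  have keyN : (a' * k) % s.length = Nat.gcd s.length k % s.length := by
    have := key
    rw [← Int.natCast_mod, ← Int.natCast_mod] at this
    exact_mod_cast this
  calc s.rotate (Nat.gcd s.length k)
      = s.rotate (Nat.gcd s.length k % s.length) := by rw [Nat.mod_eq_of_lt hg_lt]
    _ = s.rotate (a' * k % s.length) := by rw [keyN]
    _ = s.rotate (a' * k) := List.rotate_mod s _
    _ = s := pv_rotate_pow s k h a'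

-- main bridge between the two characterizations
theorem pv_div_iff_rot {α : Type} (s : List α) (hs : s ≠ []) :
    (∃ d : Nat, 1 ≤ d ∧ d < s.length ∧ d ∣ s.length ∧
        (List.replicate (s.length / d) (s.take d)).flatten = s) ↔
      (∃ k : Nat, 1 ≤ k ∧ k < s.length ∧ s.rotate k = s) := by
  have hn0 : 0 < s.length := List.length_pos_iff.mpr hs
  constructor
  · rintro ⟨d, hd1, hd2, hd3, hd4⟩
    refine ⟨d, hd1, hd2, ?_⟩
    have hm : 1 ≤ s.length / d := Nat.one_le_div_iff (by omega) |>.mpr (le_of_lt hd2)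
    have hp : (s.take d).length = d := by simp; omega
    have := pv_rep_rotate (s.take d) (s.length / d) hm
    rw [hd4, hp] at this
    exact this
  · rintro ⟨k, hk1, hk2, hrot⟩
    have hg := pv_rotate_gcd s k hk1 hk2 hrot
    refine ⟨Nat.gcd s.length k, Nat.gcd_pos_of_pos_left k hn0, 
      lt_of_le_of_lt (Nat.gcd_le_right s.length hk1) hk2, Nat.gcd_dvd_left _ _, ?_⟩
    have hdvd : Nat.gcd s.length k ∣ s.length := Nat.gcd_dvd_left _ _
    have hlen : s.length = (s.length / Nat.gcd s.length k) * Nat.gcd s.length k :=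
      (Nat.div_mul_cancel hdvd).symm
    exact (pv_rotate_rep (Nat.gcd s.length k) (Nat.gcd_pos_of_pos_left k hn0)
      (s.length / Nat.gcd s.length k) s hlen hg).symm

-- ===== VERDICT (by name: the statement is the Claim_ definition above) =====
theorem has_repeating_pattern_spec : Claim_equal_has_repeating_pattern := by
  intro v _
  unfold Spec_has_repeating_pattern
  have hA := pv_A_iff v
  have hB := pv_B_iff v
  have hbridge := pv_div_iff_rot (PySem.Int.toChars v) (pv_toChars_ne_nil v)
  rw [Bool.eq_iff_iff, hA, hB]
  exact hbridge
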